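-- pv_equiv track=rewrite | github.com/dimejibabalola/corporate-tax-app | scripts/fix_ch1_footnotes.py | get_valid_pages
-- ===== SOURCE A (Python) =====
-- from typing import List, Dict, Set, Tuple
--
-- def get_valid_pages(num: int, footer_map: Dict[int, Set[int]]) -> Set[int]:
--     # 1. Exact match
--     if num in footer_map:
--         pages = footer_map[num]
--         valid = set()
--         for p in pages:
--             valid.add(p)
--             valid.add(p-1)
--             valid.add(p+1)
--         return valid
--
--     # 2. Interpolate
--     lower_page = 0
--     curr = num - 1
--     while curr > 0:
--         if curr in footer_map:
--             lower_page = min(footer_map[curr])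
--             break
--         curr -= 1
--
--     upper_page = 9999
--     curr = num + 1
--     while curr < 300:
--         if curr in footer_map:
--             upper_page = max(footer_map[curr])
--             break
--         curr += 1
--
--     if upper_page == 9999: upper_page = lower_page + 10
--
--     # Valid range
--     return set(range(lower_page - 1, upper_page + 2))
-- ===== SOURCE B (Python) =====
-- import bisect
-- from typing import Dict, Set
--
-- def get_valid_pages(num: int, footer_map: Dict[int, Set[int]]) -> Set[int]:
--     # Exact match: each page together with its neighbours.
--     if num in footer_map:
--         valid = set()
--         for p in footer_map[num]:
--             valid.update((p, p - 1, p + 1))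
--         return valid
--
--     # Interpolate: locate the nearest keys by sorting + binary search instead of
--     # probing every integer below num and every integer up to 300.
--     keys = sorted(footer_map)
--     i = bisect.bisect_left(keys, num)   # num absent: keys[:i] < num < keys[i:]
--     if i > 0 and keys[i - 1] > 0:
--         lower_page = min(footer_map[keys[i - 1]])
--     else:
--         lower_page = 0
--     if i < len(keys) and keys[i] < 300:
--         upper_page = max(footer_map[keys[i]])
--     else:
--         upper_page = 9999
--     if upper_page == 9999:
--         upper_page = lower_page + 10
--     return set(range(lower_page - 1, upper_page + 2))
-- ===== Notes on version B (the rewrite author's own statement) =====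
-- stated objective: alternative
-- what changed: A finds the nearest footnote keys by decrementing/incrementing an integer counter one dict probe at a time (up to num steps downward and up to 300 upward); B instead sorts the keys once and locates the predecessor and successor keys with a single bisect binary search, keeping A's 9999 no-upper-footnote fallback.
import Mathlib
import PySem

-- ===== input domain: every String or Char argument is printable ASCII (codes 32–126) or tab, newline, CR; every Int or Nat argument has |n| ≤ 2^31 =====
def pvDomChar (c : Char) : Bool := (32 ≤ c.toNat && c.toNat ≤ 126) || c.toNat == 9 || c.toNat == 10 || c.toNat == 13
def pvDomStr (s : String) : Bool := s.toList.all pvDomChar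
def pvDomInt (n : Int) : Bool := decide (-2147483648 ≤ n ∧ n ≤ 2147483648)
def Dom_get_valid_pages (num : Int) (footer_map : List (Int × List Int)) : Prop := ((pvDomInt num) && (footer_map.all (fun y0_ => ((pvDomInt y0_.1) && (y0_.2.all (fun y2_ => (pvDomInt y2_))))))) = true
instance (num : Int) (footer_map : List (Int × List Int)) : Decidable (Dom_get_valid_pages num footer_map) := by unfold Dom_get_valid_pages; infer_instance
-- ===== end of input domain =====

-- B replaces A's integer-by-integer counter scans for the nearest footnote keys (down from num-1 and
-- up to 300) by one sort of the keys plus a binary search (bisect) locating the predecessor and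
-- successor keys; objective: alternative algorithm; A's 9999 no-upper-footnote fallback is kept unchanged.

-- ===== PORT A =====
-- min(s) / max(s) on a nonempty set of ints; Python raises ValueError on an empty set — excluded by Pre_
def pvMinD (v : List Int) : Int := (PySem.List.min? v (fun x => x)).getD 0
def pvMaxD (v : List Int) : Int := (PySem.List.max? v (fun x => x)).getD 0

-- `while curr > 0: if curr in footer_map: lower_page = min(...); break; curr -= 1` (lower_page = 0
-- initially); the loop runs exactly curr.toNat times, so it is transcribed by recursion on that count.
def lowerScanA (d : PySem.Dict Int (List Int)) : Nat -> Int
  | 0 => 0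
  | n + 1 =>
    match d.get? ((n + 1 : Nat) : Int) with
    | some v => pvMinD v
    | none => lowerScanA d n

-- `while curr < 300: if curr in footer_map: upper_page = max(...); break; curr += 1` (upper_page = 9999
-- initially); the loop runs at most (300 - curr).toNat times, transcribed with that count as fuel.
def upperScanAGo (d : PySem.Dict Int (List Int)) : Nat -> Int -> Int
  | 0, _ => 9999
  | n + 1, curr =>
    match d.get? curr with
    | some v => pvMaxD v
    | none => upperScanAGo d n (curr + 1)

def upperScanA (d : PySem.Dict Int (List Int)) (curr : Int) : Int :=
  upperScanAGo d (300 - curr).toNat curr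

def get_valid_pages (num : Int) (footer_map : List (Int × List Int)) : List Int :=
  let d := PySem.Dict.ofList footer_map
  match d.get? num with
  | some pages =>
      pages.foldl (fun s p => PySem.Set.add (PySem.Set.add (PySem.Set.add s p) (p - 1)) (p + 1)) PySem.Set.empty
  | none =>
      let lower_page := lowerScanA d (num - 1).toNat
      let upper_page := upperScanA d (num + 1)
      let upper_page' := if upper_page = 9999 then lower_page + 10 else upper_page
      PySem.Set.ofList (PySem.List.pyRange (lower_page - 1) (upper_page' + 2))

-- ===== PORT B =====
def get_valid_pages_alt (num : Int) (footer_map : List (Int × List Int)) : List Int :=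
  let d := PySem.Dict.ofList footer_map
  match d.get? num with
  | some pages =>
      pages.foldl (fun s p => PySem.Set.update s [p, p - 1, p + 1]) PySem.Set.empty
  | none =>
      let keys := PySem.List.sorted d.keys (fun k => k)
      let i := PySem.List.bisectLeft keys num
      let lower_page :=
        if 0 < i ∧ 0 < keys.getD (i - 1) 0 then pvMinD (d.getD (keys.getD (i - 1) 0) []) else 0
      let upper_page :=
        if i < keys.length ∧ keys.getD i 0 < 300 then pvMaxD (d.getD (keys.getD i 0) []) else 9999
      let upper_page' := if upper_page = 9999 then lower_page + 10 else upper_page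
      PySem.Set.ofList (PySem.List.pyRange (lower_page - 1) (upper_page' + 2))

-- ===== PRECONDITION & SPEC =====
-- Pre_ excludes exactly the inputs where the consulted nearest key (the largest key in (0, num) or the
-- smallest key in (num, 300), when num itself is not a key) carries an EMPTY page set: there Python's
-- min()/max() of an empty set raises ValueError in A (and in B alike).
def Pre_get_valid_pages (num : Int) (footer_map : List (Int × List Int)) : Prop :=
  let d := PySem.Dict.ofList footer_map
  d.contains num = true ∨
    ((∀ k ∈ d.keys, (0 < k ∧ k < num ∧ ∀ k' ∈ d.keys, 0 < k' ∧ k' < num → k' ≤ k) → d.getD k [] ≠ []) ∧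
     (∀ k ∈ d.keys, (num < k ∧ k < 300 ∧ ∀ k' ∈ d.keys, num < k' ∧ k' < 300 → k ≤ k') → d.getD k [] ≠ []))
instance (num : Int) (footer_map : List (Int × List Int)) : Decidable (Pre_get_valid_pages num footer_map) := by unfold Pre_get_valid_pages; infer_instance

def pvWitness_get_valid_pages : Int × (List (Int × List Int)) := (1, [(2, [3])])

def Spec_get_valid_pages (num : Int) (footer_map : List (Int × List Int)) (out : List Int) : Prop := out = get_valid_pages_alt num footer_map
instance (num : Int) (footer_map : List (Int × List Int)) (out : List Int) : Decidable (Spec_get_valid_pages num footer_map out) := by unfold Spec_get_valid_pages; infer_instance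

-- ===== CLAIM (what is proved, stated in full; the proofs are below) =====
def Claim_equal_get_valid_pages : Prop := ∀ (num : Int) (footer_map : List (Int × List Int)), Dom_get_valid_pages num footer_map → Pre_get_valid_pages num footer_map → Spec_get_valid_pages num footer_map (get_valid_pages num footer_map)

-- ===== LEMMAS AND PROOFS =====

-- keys of d lying in (0, c] resp. [c, 300)
def keyLE (d : PySem.Dict Int (List Int)) (c : Int) : List Int :=
  d.keys.filter (fun k => decide (0 < k ∧ k ≤ c))
def keyGE (d : PySem.Dict Int (List Int)) (c : Int) : List Int :=
  d.keys.filter (fun k => decide (c ≤ k ∧ k < 300))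

lemma max?_id_eq_of_mem {l : List Int} {m : Int} (hm : m ∈ l) (hub : ∀ y ∈ l, y ≤ m) :
    PySem.List.max? l (fun x => x) = some m := by
  cases hmax : PySem.List.max? l (fun x => x) with
  | none => rw [PySem.List.max?_eq_none_iff] at hmax; subst hmax; simp at hm
  | some y =>
    have h1 := PySem.List.max?_mem hmax
    have h2 := PySem.List.max?_isMax hmax m hm
    have h3 := hub y h1
    simp only [Option.some.injEq]
    omega

lemma min?_id_eq_of_mem {l : List Int} {m : Int} (hm : m ∈ l) (hlb : ∀ y ∈ l, m ≤ y) :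
    PySem.List.min? l (fun x => x) = some m := by
  cases hmin : PySem.List.min? l (fun x => x) with
  | none => rw [PySem.List.min?_eq_none_iff] at hmin; subst hmin; simp at hm
  | some y =>
    have h1 := PySem.List.min?_mem hmin
    have h2 := PySem.List.min?_isMin hmin m hm
    have h3 := hlb y h1
    simp only [Option.some.injEq]
    omega

lemma mem_keys_of_get?_some {d : PySem.Dict Int (List Int)} {k : Int} {v : List Int}
    (h : d.get? k = some v) : k ∈ d.keys := by
  rw [← PySem.Dict.contains_iff_mem_keys]
  cases hc : d.contains k with
  | false => rw [← PySem.Dict.get?_eq_none_iff_contains] at hc; rw [hc] at h; cases h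
  | true => rfl

lemma not_mem_keys_of_get?_none {d : PySem.Dict Int (List Int)} {k : Int}
    (h : d.get? k = none) : k ∉ d.keys := by
  rw [← PySem.Dict.contains_iff_mem_keys]
  rw [PySem.Dict.get?_eq_none_iff_contains] at h
  simp [h]

lemma lowerScanA_spec (d : PySem.Dict Int (List Int)) (n : Nat) :
    lowerScanA d n =
      match PySem.List.max? (keyLE d (n : Int)) (fun x => x) with
      | some k => pvMinD (d.getD k [])
      | none => 0 := by
  induction n with
  | zero =>
    have h : keyLE d (0 : Int) = [] := by
      apply List.filter_eq_nil_iff.mpr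
      intro k _
      simp only [decide_eq_true_eq]
      omega
    rw [lowerScanA, Nat.cast_zero, h, (PySem.List.max?_eq_none_iff _ _).mpr rfl]
  | succ n ih =>
    rw [lowerScanA]
    cases hv : d.get? ((n + 1 : Nat) : Int) with
    | some v =>
      have hmem : ((n + 1 : Nat) : Int) ∈ keyLE d ((n + 1 : Nat) : Int) := by
        simp only [keyLE, List.mem_filter, decide_eq_true_eq]
        refine ⟨mem_keys_of_get?_some hv, by omega, le_refl _⟩
      have hub : ∀ y ∈ keyLE d ((n + 1 : Nat) : Int), y ≤ ((n + 1 : Nat) : Int) := by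
        intro y hy
        simp only [keyLE, List.mem_filter, decide_eq_true_eq] at hy
        exact hy.2.2
      rw [max?_id_eq_of_mem hmem hub]
      have hv' : d.get? ((n : Int) + 1) = some v := by exact_mod_cast hv
      simp [PySem.Dict.getD, hv']
    | none =>
      have hfe : keyLE d ((n + 1 : Nat) : Int) = keyLE d (n : Int) := by
        apply List.filter_congr
        intro k hk
        have : k ≠ ((n + 1 : Nat) : Int) := by
          intro h; exact not_mem_keys_of_get?_none hv (h ▸ hk)
        simp only [decide_eq_decide]
        omega
      rw [hfe]
      exact ih

lemma upperScanAGo_spec (d : PySem.Dict Int (List Int)) (n : Nat) :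
    ∀ curr : Int, (300 - curr).toNat = n →
      upperScanAGo d n curr =
        match PySem.List.min? (keyGE d curr) (fun x => x) with
        | some k => pvMaxD (d.getD k [])
        | none => 9999 := by
  induction n with
  | zero =>
    intro curr hc
    have h : keyGE d curr = [] := by
      apply List.filter_eq_nil_iff.mpr
      intro k _
      simp only [decide_eq_true_eq]
      omega
    rw [upperScanAGo, h, (PySem.List.min?_eq_none_iff _ _).mpr rfl]
  | succ n ih =>
    intro curr hc
    rw [upperScanAGo]
    cases hv : d.get? curr with
    | some v =>
      have hmem : curr ∈ keyGE d curr := by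
        simp only [keyGE, List.mem_filter, decide_eq_true_eq]
        exact ⟨mem_keys_of_get?_some hv, le_refl _, by omega⟩
      have hlb : ∀ y ∈ keyGE d curr, curr ≤ y := by
        intro y hy
        simp only [keyGE, List.mem_filter, decide_eq_true_eq] at hy
        exact hy.2.1
      rw [min?_id_eq_of_mem hmem hlb]
      simp [PySem.Dict.getD, hv]
    | none =>
      have hfe : keyGE d curr = keyGE d (curr + 1) := by
        apply List.filter_congr
        intro k hk
        have : k ≠ curr := by
          intro h; exact not_mem_keys_of_get?_none hv (h ▸ hk)
        simp only [decide_eq_decide]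
        omega
      rw [hfe]
      exact ih (curr + 1) (by omega)

lemma upperScanA_spec (d : PySem.Dict Int (List Int)) (curr : Int) :
    upperScanA d curr =
      match PySem.List.min? (keyGE d curr) (fun x => x) with
      | some k => pvMaxD (d.getD k [])
      | none => 9999 :=
  upperScanAGo_spec d (300 - curr).toNat curr rfl

lemma lowerScanA_toNat_spec (d : PySem.Dict Int (List Int)) (c : Int) :
    lowerScanA d c.toNat =
      match PySem.List.max? (keyLE d c) (fun x => x) with
      | some k => pvMinD (d.getD k [])
      | none => 0 := by
  by_cases hc : c ≤ 0
  · have h1 : c.toNat = 0 := by omega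
    have h2 : keyLE d c = [] := by
      apply List.filter_eq_nil_iff.mpr
      intro k _
      simp only [decide_eq_true_eq]
      omega
    rw [h1, lowerScanA, h2, (PySem.List.max?_eq_none_iff _ _).mpr rfl]
  · have h1 : ((c.toNat : Nat) : Int) = c := by omega
    have := lowerScanA_spec d c.toNat
    rw [h1] at this
    exact this


-- Facts about the sorted key list and bisect position used by B
lemma keyLE_eq_nil (d : PySem.Dict Int (List Int)) (c : Int)
    (h : ∀ k ∈ d.keys, ¬(0 < k ∧ k ≤ c)) : keyLE d c = [] := by
  apply List.filter_eq_nil_iff.mpr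
  intro k hk
  simpa using h k hk

lemma keyGE_eq_nil (d : PySem.Dict Int (List Int)) (c : Int)
    (h : ∀ k ∈ d.keys, ¬(c ≤ k ∧ k < 300)) : keyGE d c = [] := by
  apply List.filter_eq_nil_iff.mpr
  intro k hk
  simpa using h k hk

theorem get_valid_pages_spec_aux (num : Int) (footer_map : List (Int × List Int)) :
    get_valid_pages num footer_map = get_valid_pages_alt num footer_map := by
  simp only [get_valid_pages, get_valid_pages_alt]
  generalize PySem.Dict.ofList footer_map = d
  cases hnum : d.get? num with
  | some pages => rfl
  | none =>
    set sk := PySem.List.sorted d.keys (fun k => k) with hsk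
    set i := PySem.List.bisectLeft sk num with hi
    have hpair : sk.Pairwise (fun a b => a ≤ b) := PySem.List.sorted_pairwise d.keys (fun k => k)
    obtain ⟨hlen, hlt, hge⟩ := PySem.List.bisectLeft_spec sk num hpair
    have hnmem : num ∉ d.keys := not_mem_keys_of_get?_none hnum
    have hmemsk : ∀ x, x ∈ sk ↔ x ∈ d.keys := fun x => PySem.List.mem_sorted d.keys (fun k => k) false x
    have hstrict : ∀ (j : Nat) (hj : j < sk.length), i ≤ j → num < sk[j] := by
      intro j hj hij
      have h1 := hge j hj hij
      have h2 : sk[j] ≠ num := fun h => hnmem ((hmemsk _).mp (h ▸ List.getElem_mem hj))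
      omega
    have hidx : ∀ y ∈ d.keys, ∃ (j : Nat) (hj : j < sk.length), sk[j] = y := by
      intro y hy
      exact List.getElem_of_mem ((hmemsk y).mpr hy)
    -- the lower page agrees
    have hlowB : lowerScanA d (num - 1).toNat =
        (if 0 < i ∧ 0 < sk.getD (i - 1) 0 then pvMinD (d.getD (sk.getD (i - 1) 0) []) else 0) := by
      rw [lowerScanA_toNat_spec d (num - 1)]
      by_cases hcond : 0 < i ∧ 0 < sk.getD (i - 1) 0
      · obtain ⟨hi0, hpos⟩ := hcond
        have hlt1 : i - 1 < sk.length := by omega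
        have hgetD : sk.getD (i - 1) 0 = sk[i - 1] := List.getD_eq_getElem sk 0 hlt1
        have hmem : sk.getD (i - 1) 0 ∈ keyLE d (num - 1) := by
          simp only [keyLE, List.mem_filter, decide_eq_true_eq]
          have := hlt (i - 1) hlt1 (by omega)
          rw [hgetD]
          exact ⟨(hmemsk _).mp (List.getElem_mem hlt1), by omega, by omega⟩
        have hub : ∀ y ∈ keyLE d (num - 1), y ≤ sk.getD (i - 1) 0 := by
          intro y hy
          simp only [keyLE, List.mem_filter, decide_eq_true_eq] at hy
          obtain ⟨j, hj, hjy⟩ := hidx y hy.1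
          have hji : j < i := by
            by_contra hc
            have := hstrict j hj (by omega)
            omega
          have hmono : sk[j] ≤ sk[i - 1] :=
            PySem.List.sorted_id_getElem_mono d.keys (by omega) hlt1
          omega
        rw [max?_id_eq_of_mem hmem hub, if_pos ⟨hi0, hpos⟩]
      · have hnil : keyLE d (num - 1) = [] := by
          apply keyLE_eq_nil
          intro k hk hcontra
          obtain ⟨j, hj, hjk⟩ := hidx k hk
          have hji : j < i := by
            by_contra hc
            have := hstrict j hj (by omega)
            omega
          have hi0 : 0 < i := by omega
          have hlt1 : i - 1 < sk.length := by omega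
          have hmono : sk[j] ≤ sk[i - 1] :=
            PySem.List.sorted_id_getElem_mono d.keys (by omega) hlt1
          have hgetD : sk.getD (i - 1) 0 = sk[i - 1] := List.getD_eq_getElem sk 0 hlt1
          have hnpos : ¬ 0 < sk.getD (i - 1) 0 := fun h => hcond ⟨hi0, h⟩
          omega
        rw [hnil, (PySem.List.max?_eq_none_iff _ _).mpr rfl, if_neg hcond]
    -- the upper page agrees
    have hupB : upperScanA d (num + 1) =
        (if i < sk.length ∧ sk.getD i 0 < 300 then pvMaxD (d.getD (sk.getD i 0) []) else 9999) := by
      rw [upperScanA_spec d (num + 1)]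
      by_cases hcond2 : i < sk.length ∧ sk.getD i 0 < 300
      · obtain ⟨hilen, h300⟩ := hcond2
        have hgetD : sk.getD i 0 = sk[i] := List.getD_eq_getElem sk 0 hilen
        have hmem : sk.getD i 0 ∈ keyGE d (num + 1) := by
          simp only [keyGE, List.mem_filter, decide_eq_true_eq]
          have := hstrict i hilen (le_refl i)
          rw [hgetD]
          exact ⟨(hmemsk _).mp (List.getElem_mem hilen), by omega, by omega⟩
        have hlb : ∀ y ∈ keyGE d (num + 1), sk.getD i 0 ≤ y := by
          intro y hy
          simp only [keyGE, List.mem_filter, decide_eq_true_eq] at hy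
          obtain ⟨j, hj, hjy⟩ := hidx y hy.1
          have hji : i ≤ j := by
            by_contra hc
            have := hlt j hj (by omega)
            omega
          have hmono : sk[i] ≤ sk[j] :=
            PySem.List.sorted_id_getElem_mono d.keys hji hj
          omega
        rw [min?_id_eq_of_mem hmem hlb, if_pos ⟨hilen, h300⟩]
      · have hnil : keyGE d (num + 1) = [] := by
          apply keyGE_eq_nil
          intro k hk hcontra
          obtain ⟨j, hj, hjk⟩ := hidx k hk
          have hji : i ≤ j := by
            by_contra hc
            have := hlt j hj (by omega)
            omega
          have hilen : i < sk.length := by omega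
          have hmono : sk[i] ≤ sk[j] :=
            PySem.List.sorted_id_getElem_mono d.keys hji hj
          have hgetD : sk.getD i 0 = sk[i] := List.getD_eq_getElem sk 0 hilen
          have hn300 : ¬ sk.getD i 0 < 300 := fun h => hcond2 ⟨hilen, h⟩
          omega
        rw [hnil, (PySem.List.min?_eq_none_iff _ _).mpr rfl, if_neg hcond2]
    rw [hlowB, hupB]

-- ===== VERDICT (by name: the statement is the Claim_ definition above) =====
theorem get_valid_pages_spec : Claim_equal_get_valid_pages := by
  intro num footer_map _ _
  exact get_valid_pages_spec_aux num footer_map
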